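-- pv_equiv track=rewrite | github.com/sandeeprane95/Web-Search-Engine | user_interface.py | assignRanks
-- ===== SOURCE A (Python) =====
-- def assignRanks(simList,rankDict):
--     finalRank = []
--     for page in simList:
--         tempArr = []
--         for val in page:
--             if val[1] in rankDict:
--                 tempArr.append((rankDict[val[1]], val[1]))
--         tempArr.sort()
--         finalRank.append(tempArr[0:30])
--     finalRank = finalRank[0]
--     for i in range(len(finalRank)):
--         finalRank[i] = finalRank[i][1]
--     return finalRank
-- ===== SOURCE B (Python) =====
-- def assignRanks(simList, rankDict):
--     # Streaming top-k selection: only the first page can ever be returned by A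
--     # (finalRank = finalRank[0]), so scan it once, keeping an ascending list of
--     # at most 30 (rank, id) pairs; no full sort, no ranking of the other pages.
--     top = []
--     for val in simList[0]:
--         pid = val[1]
--         if pid in rankDict:
--             item = (rankDict[pid], pid)
--             if len(top) == 30 and top[-1] <= item:
--                 continue
--             i = 0
--             while i < len(top) and top[i] <= item:
--                 i += 1
--             top.insert(i, item)
--             if len(top) > 30:
--                 top.pop()
--     return [pid for _, pid in top]
-- ===== Notes on version B (the rewrite author's own statement) =====
-- stated objective: alternative
-- what changed: A builds, fully sorts and truncates a ranking for every page and keeps only the first; B makes a single streaming pass over the first page only, maintaining a bounded (<=30) ascending list by in-place insertion with an early-skip guard, so no list is ever fully sorted.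
import Mathlib
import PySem

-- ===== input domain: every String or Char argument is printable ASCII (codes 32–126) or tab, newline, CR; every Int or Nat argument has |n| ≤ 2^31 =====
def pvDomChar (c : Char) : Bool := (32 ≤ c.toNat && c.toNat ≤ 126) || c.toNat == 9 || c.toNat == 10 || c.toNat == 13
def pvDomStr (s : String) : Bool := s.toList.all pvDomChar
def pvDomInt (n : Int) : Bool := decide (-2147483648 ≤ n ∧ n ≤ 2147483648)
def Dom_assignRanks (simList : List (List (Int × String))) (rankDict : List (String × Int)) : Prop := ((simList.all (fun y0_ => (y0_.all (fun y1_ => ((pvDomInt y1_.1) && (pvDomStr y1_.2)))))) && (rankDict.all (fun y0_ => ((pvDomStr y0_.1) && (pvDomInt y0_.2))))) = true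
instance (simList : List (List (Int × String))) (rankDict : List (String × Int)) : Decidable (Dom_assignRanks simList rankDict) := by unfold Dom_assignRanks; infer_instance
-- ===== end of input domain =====

-- B replaces A's rank-sort-slice of every page by ONE streaming pass over the
-- first page (the only one A's `finalRank = finalRank[0]` keeps), maintaining
-- a bounded ascending list of at most 30 (rank, id) pairs; nothing is sorted.

-- ===== PORT A =====
-- A's final loop `for i in range(len(finalRank)): finalRank[i] = finalRank[i][1]`
-- rewrites the list element-wise in place; its typed transliteration reads each
-- finalRank[i] by index over the same range.
def assignRanks (simList : List (List (Int × String))) (rankDict : List (String × Int)) : List String :=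
  let d := PySem.Dict.ofList rankDict
  let finalRank : List (List (Int × String)) :=
    simList.foldl (fun acc page =>
      let tempArr : List (Int × String) :=
        page.foldl (fun t val =>
          if d.contains val.2 then t ++ [(d.getD val.2 0, val.2)] else t) []
      acc ++ [PySem.List.slice (PySem.List.sorted2 tempArr (·.1) (·.2)) (some 0) (some 30)]) []
  let fr : List (Int × String) := (PySem.List.pyGet? finalRank 0).getD []   -- finalRank[0]; Pre_ excludes the IndexError
  (PySem.List.pyRange 0 (fr.length : Int) 1).map (fun i => (PySem.List.pyGetD fr i (0, "")).2)

-- ===== PORT B =====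
-- Python tuple comparison `(r1, id1) <= (r2, id2)` (lexicographic)
def pvLeB (a b : Int × String) : Bool :=
  decide (a.1 < b.1) || (decide (a.1 = b.1) && decide (a.2 ≤ b.2))

-- Source B's `i = 0; while i < len(top) and top[i] <= item: i += 1; top.insert(i, item)`
def pvIns (x : Int × String) : List (Int × String) → List (Int × String)
  | [] => [x]
  | y :: ys => if pvLeB y x then y :: pvIns x ys else x :: y :: ys

-- Source B's `top[-1] <= item` (reached only when len(top) == 30, so top[-1] exists)
def pvLastLeB (top : List (Int × String)) (x : Int × String) : Bool :=
  (PySem.List.pyGet? top (-1)).elim false (fun lastv => pvLeB lastv x)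

-- one body of Source B's loop on an item that survived the dict test
def pvStep (top : List (Int × String)) (x : Int × String) : List (Int × String) :=
  if top.length == 30 && pvLastLeB top x then
    top                                                          -- `continue`
  else if 30 < (pvIns x top).length then (pvIns x top).dropLast  -- `top.pop()`
  else pvIns x top

def assignRanks_alt (simList : List (List (Int × String))) (rankDict : List (String × Int)) : List String :=
  let d := PySem.Dict.ofList rankDict
  let page : List (Int × String) := (PySem.List.pyGet? simList 0).getD []   -- simList[0]; Pre_ excludes the IndexError
  let top : List (Int × String) :=
    page.foldl (fun top v =>
      if d.contains v.2 then pvStep top (d.getD v.2 0, v.2) else top) []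
  top.map (·.2)

-- ===== PRECONDITION & SPEC =====
-- A evaluates finalRank[0]: on simList = [] it raises IndexError, so that input is excluded.
def Pre_assignRanks (simList : List (List (Int × String))) (rankDict : List (String × Int)) : Prop := simList ≠ []
instance (simList : List (List (Int × String))) (rankDict : List (String × Int)) : Decidable (Pre_assignRanks simList rankDict) := by unfold Pre_assignRanks; infer_instance
def pvWitness_assignRanks : (List (List (Int × String))) × (List (String × Int)) := ([[(1, "a"), (2, "b")]], [("a", 3), ("b", 1)])
def Spec_assignRanks (simList : List (List (Int × String))) (rankDict : List (String × Int)) (out : List String) : Prop := out = assignRanks_alt simList rankDict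
instance (simList : List (List (Int × String))) (rankDict : List (String × Int)) (out : List String) : Decidable (Spec_assignRanks simList rankDict out) := by unfold Spec_assignRanks; infer_instance

-- ===== CLAIM =====
def Claim_equal_assignRanks : Prop := ∀ (simList : List (List (Int × String))) (rankDict : List (String × Int)), Dom_assignRanks simList rankDict → Pre_assignRanks simList rankDict → Spec_assignRanks simList rankDict (assignRanks simList rankDict)

-- ===== LEMMAS AND PROOFS =====

-- the lexicographic order behind Python's tuple `<=`
def pvLe (a b : Int × String) : Prop := a.1 < b.1 ∨ (a.1 = b.1 ∧ a.2 ≤ b.2)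

theorem pvLeB_iff {a b : Int × String} : pvLeB a b = true ↔ pvLe a b := by
  simp [pvLeB, pvLe]

theorem pvLeB_false_iff {a b : Int × String} : pvLeB a b = false ↔ ¬ pvLe a b := by
  rw [← pvLeB_iff, Bool.eq_false_iff]

theorem pvLe_refl (a : Int × String) : pvLe a a := Or.inr ⟨rfl, le_refl _⟩

theorem pvLe_trans {a b c : Int × String} (h1 : pvLe a b) (h2 : pvLe b c) : pvLe a c := by
  rcases h1 with h1 | ⟨e1, s1⟩ <;> rcases h2 with h2 | ⟨e2, s2⟩
  · exact Or.inl (h1.trans h2)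
  · exact Or.inl (e2 ▸ h1)
  · exact Or.inl (e1 ▸ h2)
  · exact Or.inr ⟨e1.trans e2, s1.trans s2⟩

theorem pvLe_of_not_le {a b : Int × String} (h : ¬ pvLe a b) : pvLe b a := by
  unfold pvLe at *
  rcases lt_trichotomy a.1 b.1 with h1 | h1 | h1
  · exact absurd (Or.inl h1) h
  · rcases le_total a.2 b.2 with h2 | h2
    · exact absurd (Or.inr ⟨h1, h2⟩) h
    · exact Or.inr ⟨h1.symm, h2⟩
  · exact Or.inl h1

-- sorted2's internal `before` test (see PySem.List.sorted2)
def pvBef (a b : Int × String) : Bool :=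
  decide (a.1 < b.1) || (!decide (b.1 < a.1) && decide (a.2 < b.2))

theorem pvBef_eq_not_le (x y : Int × String) : pvBef x y = !pvLeB y x := by
  rcases lt_trichotomy x.1 y.1 with h | h | h
  · simp [pvBef, pvLeB, h, h.asymm, h.ne']
  · simp only [pvBef, pvLeB, h, lt_self_iff_false, decide_false, Bool.false_or, decide_true,
      Bool.not_false, Bool.true_and]
    by_cases hpq : y.2 ≤ x.2
    · simp [not_lt.mpr hpq, hpq]
    · simp [hpq, not_le.mp hpq]
  · simp [pvBef, pvLeB, h, h.asymm, h.ne]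

theorem pv_sorted2_eq (xs : List (Int × String)) :
    PySem.List.sorted2 xs (·.1) (·.2) =
      xs.foldl (fun acc x => PySem.List.insertBy pvBef x acc) [] := rfl

theorem pvIns_eq_insertBy (x : Int × String) (l : List (Int × String)) :
    pvIns x l = PySem.List.insertBy pvBef x l := by
  induction l with
  | nil => rfl
  | cons y ys ih =>
    simp only [pvIns, PySem.List.insertBy, pvBef_eq_not_le]
    cases h : pvLeB y x <;> simp [ih]

theorem pv_mem_ins {z x : Int × String} {l : List (Int × String)} :
    z ∈ pvIns x l ↔ z = x ∨ z ∈ l := by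
  induction l with
  | nil => simp [pvIns]
  | cons y ys ih =>
    simp only [pvIns]
    split
    · simp only [List.mem_cons, ih]; tauto
    · simp only [List.mem_cons]

theorem pv_length_ins (x : Int × String) (l : List (Int × String)) :
    (pvIns x l).length = l.length + 1 := by
  induction l with
  | nil => rfl
  | cons y ys ih => simp only [pvIns]; split <;> simp [ih]

theorem pv_pairwise_ins {x : Int × String} {l : List (Int × String)}
    (h : l.Pairwise pvLe) : (pvIns x l).Pairwise pvLe := by
  induction l with
  | nil => simp [pvIns]
  | cons y ys ih =>
    rcases List.pairwise_cons.mp h with ⟨hy, hys⟩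
    simp only [pvIns]
    split
    · rename_i hle
      refine List.pairwise_cons.mpr ⟨?_, ih hys⟩
      intro z hz
      rcases pv_mem_ins.mp hz with rfl | hz
      · exact pvLeB_iff.mp hle
      · exact hy z hz
    · rename_i hnle
      have hxy : pvLe x y := pvLe_of_not_le (fun hc => hnle (pvLeB_iff.mpr hc))
      exact List.pairwise_cons.mpr ⟨by
        intro z hz
        rcases List.mem_cons.mp hz with rfl | hz
        · exact hxy
        · exact pvLe_trans hxy (hy z hz), h⟩

-- insertion passes an all-≤ prefix unchanged
theorem pv_ins_append_all {x : Int × String} {l r : List (Int × String)}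
    (h : ∀ y ∈ l, pvLe y x) : pvIns x (l ++ r) = l ++ pvIns x r := by
  induction l with
  | nil => rfl
  | cons y ys ih =>
    have hy : pvLeB y x = true := pvLeB_iff.mpr (h y List.mem_cons_self)
    simp only [List.cons_append, pvIns, hy, if_true]
    rw [ih (fun z hz => h z (List.mem_cons_of_mem _ hz))]

-- insertion that lands inside the prefix ignores the suffix
theorem pv_ins_append_of_stop {x : Int × String} {l r : List (Int × String)}
    (h : ∃ y ∈ l, pvLeB y x = false) : pvIns x (l ++ r) = pvIns x l ++ r := by
  induction l with
  | nil => rcases h with ⟨y, hy, _⟩; cases hy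
  | cons y ys ih =>
    simp only [List.cons_append, pvIns]
    cases hle : pvLeB y x
    · simp
    · simp only [if_true]
      rcases h with ⟨z, hz, hzf⟩
      rcases List.mem_cons.mp hz with rfl | hz
      · rw [hle] at hzf; cases hzf
      · rw [ih ⟨z, hz, hzf⟩]; simp

theorem pv_last_is_max {l : List (Int × String)} (h : l.Pairwise pvLe) (hne : l ≠ [])
    {y : Int × String} (hy : y ∈ l) : pvLe y (l.getLast hne) := by
  rcases List.eq_nil_or_concat l with rfl | ⟨l', m, hl⟩
  · cases hne rfl
  · subst hl
    simp only [List.concat_eq_append] at h hy ⊢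
    rw [List.getLast_append_singleton]
    rcases List.mem_append.mp hy with hy | hy
    · exact (List.pairwise_append.mp h).2.2 y hy m (List.mem_singleton_self m)
    · rw [List.mem_singleton.mp hy]; exact pvLe_refl m

-- the key step: on a sorted full list s, Source B's bounded step on s.take 30
-- computes the take-30 of a full insertion into s
theorem pv_step_eq {s : List (Int × String)} (hs : s.Pairwise pvLe) (x : Int × String) :
    pvStep (s.take 30) x = (pvIns x s).take 30 := by
  by_cases hlen : s.length < 30
  · rw [List.take_of_length_le (by omega)]
    unfold pvStep
    have h30 : (s.length == 30) = false := by simp; omega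
    rw [h30]
    simp only [Bool.false_and, Bool.false_eq_true, if_false]
    rw [if_neg (by rw [pv_length_ins]; omega)]
    rw [List.take_of_length_le (by rw [pv_length_ins]; omega)]
  · have hlen' : 30 ≤ s.length := by omega
    set t := s.take 30 with ht
    have htl : t.length = 30 := by rw [ht, List.length_take]; omega
    have htne : t ≠ [] := by intro hc; rw [hc] at htl; simp at htl
    have hts : t ++ s.drop 30 = s := List.take_append_drop 30 s
    have htp : t.Pairwise pvLe := by rw [ht]; exact hs.sublist (List.take_sublist _ _)
    set m := t.getLast htne with hm
    have hlast : pvLastLeB t x = pvLeB m x := by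
      rw [pvLastLeB, PySem.List.pyGet?_neg_one, List.getLast?_eq_some_getLast htne]
      rfl
    by_cases hmx : pvLe m x
    · -- item does not enter the top 30: the guard fires, and the full
      -- insertion lands past index 29, so the take-30 is unchanged
      have hall : ∀ y ∈ t, pvLe y x := fun y hy => pvLe_trans (pv_last_is_max htp htne hy) hmx
      have hguard : (t.length == 30 && pvLastLeB t x) = true := by
        simp [htl, hlast, pvLeB_iff.mpr hmx]
      rw [show pvStep t x = t from by unfold pvStep; rw [if_pos hguard]]
      conv_rhs => rw [← hts]
      rw [pv_ins_append_all hall, ← htl, List.take_left]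
    · -- item enters: the guard is off and the insertion stays inside t
      have hmxB : pvLeB m x = false := pvLeB_false_iff.mpr hmx
      have hguard : (t.length == 30 && pvLastLeB t x) = false := by
        simp [hlast, hmxB]
      have hlhs : pvStep t x = (pvIns x t).dropLast := by
        unfold pvStep
        rw [hguard]
        simp only [Bool.false_eq_true, if_false]
        rw [if_pos (by rw [pv_length_ins, htl]; omega)]
      rw [hlhs]
      conv_rhs => rw [← hts]
      rw [pv_ins_append_of_stop ⟨m, List.getLast_mem htne, hmxB⟩]
      rw [List.take_append_of_le_length (by rw [pv_length_ins, htl]; omega)]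
      rw [List.dropLast_eq_take, pv_length_ins, htl]

theorem pv_fold_step_eq (l : List (Int × String)) :
    ∀ (s : List (Int × String)), s.Pairwise pvLe →
      l.foldl pvStep (s.take 30) = (l.foldl (fun acc x => pvIns x acc) s).take 30 := by
  induction l with
  | nil => intro s _; rfl
  | cons x xs ih =>
    intro s hs
    simp only [List.foldl_cons]
    rw [pv_step_eq hs x, ih _ (pv_pairwise_ins hs)]

-- filter the dict test out of Source B's loop
theorem pv_fold_filter (d : PySem.Dict String Int) (page : List (Int × String))
    (init : List (Int × String)) :
    page.foldl (fun top v => if d.contains v.2 then pvStep top (d.getD v.2 0, v.2) else top) init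
      = (page.filterMap (fun v => if d.contains v.2 then some (d.getD v.2 0, v.2) else none)).foldl
          pvStep init := by
  induction page generalizing init with
  | nil => rfl
  | cons v vs ih =>
    simp only [List.foldl_cons, List.filterMap_cons]
    by_cases h : d.contains v.2 <;> simp [h, ih]

-- A's append-if fold builds exactly the filterMap of the page.
theorem pv_fold_filterMap (d : PySem.Dict String Int) (page : List (Int × String)) (init : List (Int × String)) :
    page.foldl (fun t val => if d.contains val.2 then t ++ [(d.getD val.2 0, val.2)] else t) init
      = init ++ page.filterMap (fun v => if d.contains v.2 then some (d.getD v.2 0, v.2) else none) := by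
  induction page generalizing init with
  | nil => simp
  | cons x xs ih =>
    simp only [List.foldl_cons, List.filterMap_cons]
    by_cases h : d.contains x.2
    · simp [h, ih]
    · simp [h, ih]

theorem pv_final_loop (fr : List (Int × String)) :
    (PySem.List.pyRange 0 (fr.length : Int) 1).map (fun i => (PySem.List.pyGetD fr i ((0 : Int), "")).2)
      = fr.map (·.2) := by
  rw [show (fun i => (PySem.List.pyGetD fr i ((0 : Int), "")).2)
        = (fun x : Int × String => x.2) ∘ (fun i => PySem.List.pyGetD fr i ((0 : Int), "")) from rfl]
  rw [← List.map_map, PySem.List.map_pyGetD_pyRange_zero']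

theorem pv_slice30 (xs : List (Int × String)) :
    PySem.List.slice xs (some 0) (some 30) = xs.take 30 := by
  rw [PySem.List.slice_zero_start, PySem.List.slice_to xs (by norm_num)]
  rfl

-- ===== VERDICT =====
theorem assignRanks_spec : Claim_equal_assignRanks := by
  intro simList rankDict _ hpre
  unfold Spec_assignRanks assignRanks assignRanks_alt
  cases simList with
  | nil => exact absurd rfl hpre
  | cons p rest =>
    simp only [List.foldl_cons]
    rw [PySem.List.foldl_append_singleton_eq_map]
    simp only [List.nil_append, List.singleton_append, PySem.List.pyGet?_zero_cons, Option.getD_some]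
    rw [pv_fold_filterMap, List.nil_append, pv_slice30, pv_final_loop]
    rw [pv_fold_filter, pv_sorted2_eq]
    rw [List.foldl_ext _ (fun acc x => pvIns x acc) []
        (fun acc x _ => pvIns_eq_insertBy x acc ▸ rfl)]
    rw [← pv_fold_step_eq _ [] List.Pairwise.nil]
    rfl
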